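-- pv_equiv track=rewrite | github.com/bonin1/data-retrieval | exporters.py | _get_ordered_headers
-- ===== SOURCE A (Python) =====
-- from typing import List, Dict, Any, Optional
--
-- def _get_ordered_headers(headers: set) -> List[str]:
--     """Get ordered headers for CSV export"""
--     priority_headers = [
--         'id', 'name', 'url', 'description', 'price', 'old_price',
--         'currency', 'discount_percentage', 'availability', 'brand',
--         'model', 'categories', 'tags', 'rating', 'reviews_count'
--     ]
--
--     ordered = []
--     for header in priority_headers:
--         if header in headers:
--             ordered.append(header)
--             headers.remove(header)
--
--     # Add remaining headers alphabetically
--     ordered.extend(sorted(headers))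
--
--     return ordered
-- ===== SOURCE B (Python) =====
-- def _get_ordered_headers(headers: set):
--     """Get ordered headers for CSV export (single composite-key sort)."""
--     priority_headers = [
--         'id', 'name', 'url', 'description', 'price', 'old_price',
--         'currency', 'discount_percentage', 'availability', 'brand',
--         'model', 'categories', 'tags', 'rating', 'reviews_count'
--     ]
--     rank = {h: i for i, h in enumerate(priority_headers)}
--     ordered = sorted(headers, key=lambda h: (rank.get(h, len(priority_headers)), h))
--     # reproduce the original's side effect on the argument set
--     headers.difference_update(priority_headers)
--     return ordered
-- ===== Notes on version B (the rewrite author's own statement) =====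
-- stated objective: idiomatic
-- what changed: Replaces the priority-loop-then-sort partition (scan priority list, pull members out of the set, sort the rest) by one composite-key sort: sorted(headers, key=lambda h: (rank.get(h, len(priority_headers)), h)) over a rank dict built once; the argument set is mutated the same way via difference_update.
import Mathlib
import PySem

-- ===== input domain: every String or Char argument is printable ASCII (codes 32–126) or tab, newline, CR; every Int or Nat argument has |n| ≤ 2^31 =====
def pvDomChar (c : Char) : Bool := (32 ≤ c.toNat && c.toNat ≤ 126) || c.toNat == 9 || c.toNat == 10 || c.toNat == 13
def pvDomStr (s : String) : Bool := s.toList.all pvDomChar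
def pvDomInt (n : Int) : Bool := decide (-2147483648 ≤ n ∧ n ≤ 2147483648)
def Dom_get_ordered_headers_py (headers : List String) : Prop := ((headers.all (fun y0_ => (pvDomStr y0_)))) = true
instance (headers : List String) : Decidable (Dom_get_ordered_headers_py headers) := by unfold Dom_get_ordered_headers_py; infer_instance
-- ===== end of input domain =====

-- B replaces A's priority-scan-then-sort partition by one composite-key sort over a rank
-- dict (objective: idiomatic); equivalence is about the RETURN value — the Python argument
-- is a set both versions mutate identically (B's difference_update mirrors A's removals).

-- ===== PORT A =====
def priorityHeadersA : List String :=
  ["id", "name", "url", "description", "price", "old_price",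
   "currency", "discount_percentage", "availability", "brand",
   "model", "categories", "tags", "rating", "reviews_count"]

-- the loop 'if header in headers: ordered.append(header); headers.remove(header)';
-- remove is guarded by the membership test, so it is exactly Set.discard here
def get_ordered_headers_py (headers : List String) : List String :=
  let st := priorityHeadersA.foldl
    (fun (st : List String × List String) header =>
      if PySem.Set.contains st.2 header then
        (st.1 ++ [header], PySem.Set.discard st.2 header)
      else st)
    ([], headers)
  st.1 ++ PySem.List.sorted st.2 (fun x => x) false

-- ===== PORT B =====
def priorityHeadersB : List String :=
  ["id", "name", "url", "description", "price", "old_price",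
   "currency", "discount_percentage", "availability", "brand",
   "model", "categories", "tags", "rating", "reviews_count"]

-- rank = {h: i for i, h in enumerate(priority_headers)}
def rankDictB : PySem.Dict String Int :=
  (PySem.List.enumerate priorityHeadersB).foldl
    (fun d p => PySem.Dict.insert d p.2 p.1) PySem.Dict.empty

-- sorted(headers, key=lambda h: (rank.get(h, len(priority_headers)), h));
-- the difference_update mutation has no counterpart in a pure port
def get_ordered_headers_py_alt (headers : List String) : List String :=
  PySem.List.sorted2 headers
    (fun h => PySem.Dict.getD rankDictB h (priorityHeadersB.length : Int))
    (fun h => h) false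

-- ===== PRECONDITION & SPEC =====
-- The Python parameter is a set; a List String models it only when its elements are
-- distinct (nothing on the set side is excluded).
def Pre_get_ordered_headers_py (headers : List String) : Prop := headers.Nodup
instance (headers : List String) : Decidable (Pre_get_ordered_headers_py headers) := by
  unfold Pre_get_ordered_headers_py; infer_instance
def pvWitness_get_ordered_headers_py : List String := ["price", "zebra", "id", "apple"]

def Spec_get_ordered_headers_py (headers : List String) (out : List String) : Prop := out = get_ordered_headers_py_alt headers
instance (headers : List String) (out : List String) : Decidable (Spec_get_ordered_headers_py headers out) := by unfold Spec_get_ordered_headers_py; infer_instance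

-- ===== CLAIM (what is proved, stated in full; the proofs are below) =====
def Claim_equal_get_ordered_headers_py : Prop := ∀ (headers : List String), Dom_get_ordered_headers_py headers → Pre_get_ordered_headers_py headers → Spec_get_ordered_headers_py headers (get_ordered_headers_py headers)

-- ===== LEMMAS AND PROOFS =====

-- the composite key of B, as a single lexicographic key
def pvRank (h : String) : Int :=
  PySem.Dict.getD rankDictB h (priorityHeadersB.length : Int)

-- A's loop over a duplicate-free priority list partitions the set
theorem pv_loop_char (pri : List String) (acc s : List String) (hnd : pri.Nodup) :
    pri.foldl
      (fun (st : List String × List String) header =>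
        if PySem.Set.contains st.2 header then
          (st.1 ++ [header], PySem.Set.discard st.2 header)
        else st)
      (acc, s)
    = (acc ++ pri.filter (fun h => s.contains h),
       s.filter (fun y => !(pri.contains y))) := by
  induction pri generalizing acc s with
  | nil => simp
  | cons h t ih =>
    rw [List.nodup_cons] at hnd
    rw [List.foldl_cons]
    by_cases hc : PySem.Set.contains s h = true
    · rw [if_pos hc, ih _ _ hnd.2]
      apply Prod.ext
      · show acc ++ [h] ++ _ = acc ++ _
        rw [List.filter_cons_of_pos (by simpa [PySem.Set.contains] using hc),
            List.append_assoc]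
        congr 1
        rw [List.singleton_append]
        congr 1
        apply List.filter_congr
        intro x hx
        have hne : ¬ (x = h) := fun e => hnd.1 (e ▸ hx)
        show List.contains (PySem.Set.discard s h) x = s.contains x
        simp [PySem.Set.discard, List.mem_filter, hne]
      · show List.filter _ (PySem.Set.discard s h) = _
        rw [PySem.Set.discard, List.filter_filter]
        apply List.filter_congr
        intro y _
        simp [beq_eq_decide]
        by_cases hyh : y = h <;> simp [hyh]
    · rw [if_neg hc, ih _ _ hnd.2]
      have hmem : h ∉ s := by simpa [PySem.Set.contains] using hc
      apply Prod.ext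
      · show acc ++ _ = acc ++ _
        rw [List.filter_cons_of_neg (by simpa [PySem.Set.contains] using hc)]
      · apply List.filter_congr
        intro y hy
        have hne : ¬ (y = h) := fun e => hmem (e ▸ hy)
        simp [hne]

-- sorted2 with an Int-then-String tuple key is sorted with the lexicographic key
theorem pv_sorted2_eq_lex (xs : List String) (k1 : String → Int) (k2 : String → String) :
    PySem.List.sorted2 xs k1 k2 false
      = PySem.List.sorted xs (fun x => toLex (k1 x, k2 x)) false := by
  have hb : (fun a b : String =>
        decide (k1 a < k1 b) || (!decide (k1 b < k1 a) && decide (k2 a < k2 b)))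
      = (fun a b : String => decide (toLex (k1 a, k2 a) < toLex (k1 b, k2 b))) := by
    funext a b
    rcases lt_trichotomy (k1 a) (k1 b) with h | h | h <;>
      simp [Prod.Lex.toLex_lt_toLex, h, not_lt_of_gt]
  simp only [PySem.List.sorted2, PySem.List.sorted, hb]
  rfl

-- rank of a non-priority header is the default 15
theorem pv_rank_notmem (x : String) (hx : x ∉ priorityHeadersB) : pvRank x = 15 := by
  have hf : List.find? (fun p => p.1 == x) rankDictB.items = none := by
    rw [List.find?_eq_none]
    intro p hp
    have : p.1 ∈ priorityHeadersB := by
      fin_cases hp <;> simp [priorityHeadersB]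
    simp only [beq_iff_eq]
    intro h; exact hx (h ▸ this)
  simp [pvRank, PySem.Dict.getD, PySem.Dict.get?, hf, priorityHeadersB]

-- rank of a priority header is below 15
theorem pv_rank_mem (x : String) (hx : x ∈ priorityHeadersB) : pvRank x < 15 := by
  fin_cases hx <;> decide

-- the priority list is strictly increasing under the lexicographic key
theorem pv_pairwise_priority :
    priorityHeadersA.Pairwise (fun a b => toLex (pvRank a, a) < toLex (pvRank b, b)) := by
  have h : priorityHeadersA.Pairwise (fun a b => pvRank a < pvRank b) := by decide
  exact h.imp (fun hr => Prod.Lex.toLex_lt_toLex.2 (Or.inl hr))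

-- membership in A's leftover set means not a priority header
theorem pv_mem_rem (headers : List String) (x : String)
    (hx : x ∈ headers.filter (fun y => !(priorityHeadersA.contains y))) :
    x ∉ priorityHeadersB := by
  have h2 : x ∉ priorityHeadersA := by simpa using (List.mem_filter.1 hx).2
  exact h2

-- ===== VERDICT (by name: the statement is the Claim_ definition above) =====
theorem get_ordered_headers_py_spec : Claim_equal_get_ordered_headers_py := by
  intro headers _ hnd
  unfold Pre_get_ordered_headers_py at hnd
  unfold Spec_get_ordered_headers_py
  unfold get_ordered_headers_py get_ordered_headers_py_alt
  rw [pv_loop_char _ _ _ (by decide), pv_sorted2_eq_lex]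
  have hP : priorityHeadersA.Nodup := by decide
  have hrem : (headers.filter (fun y => !(priorityHeadersA.contains y))).Nodup :=
    hnd.filter _
  refine (PySem.List.sorted_eq_of_perm_of_pairwise_lt headers _
    (fun x => toLex (pvRank x, x)) ?_ ?_).symm
  · -- A's output is a permutation of headers
    have h1 : (priorityHeadersA.filter (fun h => headers.contains h)).Perm
        (headers.filter (fun h => priorityHeadersA.contains h)) := by
      rw [List.perm_ext_iff_of_nodup (hP.filter _) (hnd.filter _)]
      intro a
      simp [List.mem_filter, and_comm]
    have h2 := PySem.List.sorted_perm
      (headers.filter (fun y => !(priorityHeadersA.contains y))) (fun x => x) false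
    simpa using (h1.append h2).trans
      (List.filter_append_perm (fun h => priorityHeadersA.contains h) headers)
  · -- A's output is strictly increasing under the key
    simp only [List.nil_append]
    rw [List.pairwise_append]
    refine ⟨?_, ?_, ?_⟩
    · exact List.Pairwise.sublist (List.filter_sublist) pv_pairwise_priority
    · have hle := PySem.List.sorted_pairwise
        (headers.filter (fun y => !(priorityHeadersA.contains y))) (fun x => x)
      have hnd2 : (PySem.List.sorted
          (headers.filter (fun y => !(priorityHeadersA.contains y))) (fun x => x) false).Nodup :=
        ((PySem.List.sorted_perm _ _ _).nodup_iff).2 hrem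
      have hcomb := hle.and (List.Pairwise.imp (fun h => h) hnd2)
      refine hcomb.imp_of_mem ?_
      intro a b ha hb hab
      have hma := pv_mem_rem headers a ((PySem.List.mem_sorted _ _ _ _).1 ha)
      have hmb := pv_mem_rem headers b ((PySem.List.mem_sorted _ _ _ _).1 hb)
      refine Prod.Lex.toLex_lt_toLex.2 (Or.inr ⟨?_, ?_⟩)
      · rw [pv_rank_notmem a hma, pv_rank_notmem b hmb]
      · exact lt_of_le_of_ne hab.1 hab.2
    · intro a ha b hb
      have hma : a ∈ priorityHeadersB := by
        have h2 : a ∈ priorityHeadersA := by simpa using (List.mem_filter.1 ha).1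
        exact h2
      have hmb := pv_mem_rem headers b ((PySem.List.mem_sorted _ _ _ _).1 hb)
      refine Prod.Lex.toLex_lt_toLex.2 (Or.inl ?_)
      rw [pv_rank_notmem b hmb]
      exact pv_rank_mem a hma
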